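-- pv_equiv track=rewrite | github.com/ZOULIANDTONG/iBookRead | ibook_reader/parsers/markdown_parser.py | _clean_indentation
-- ===== SOURCE A (Python) =====
-- def _clean_indentation(content: str) -> str:
--     """
--     清理内容中的前导空格/缩进，并压缩多余的空行
--
--     Args:
--         content: 原始内容
--
--     Returns:
--         清理后的内容
--     """
--     lines = content.split('\n')
--     cleaned_lines = []
--     prev_empty = False
--
--     for line in lines:
--         # 移除每行的前导空格
--         if line.strip():
--             cleaned_lines.append(line.lstrip())
--             prev_empty = False
--         else:
--             # 压缩连续的空行：只保留一个空行
--             if not prev_empty: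
--                 cleaned_lines.append('')
--                 prev_empty = True
--
--     # 移除末尾的空行
--     while cleaned_lines and cleaned_lines[-1] == '':
--         cleaned_lines.pop()
--
--     return '\n'.join(cleaned_lines)
-- ===== SOURCE B (Python) =====
-- def _clean_indentation(content: str) -> str:
--     # stage 1: lstrip every line (whitespace-only lines become '')
--     stripped = [line.lstrip() for line in content.split('\n')]
--     # stage 2: drop a '' whose predecessor is also '' (adjacent-blank dedup via zip)
--     kept = stripped[:1] + [cur for prev, cur in zip(stripped, stripped[1:]) if cur or prev]
--     # stage 3: pop trailing '' entries, then join
--     while kept and kept[-1] == '':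
--         kept.pop()
--     return '\n'.join(kept)
-- ===== Notes on version B (the rewrite author's own statement) =====
-- stated objective: alternative
-- what changed: Replaces A's single stateful loop with a prev_empty flag by three stateless staged passes: map lstrip over every line, deduplicate adjacent blank entries by zipping the list with its own tail, then pop trailing blanks and join.
import Mathlib
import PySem

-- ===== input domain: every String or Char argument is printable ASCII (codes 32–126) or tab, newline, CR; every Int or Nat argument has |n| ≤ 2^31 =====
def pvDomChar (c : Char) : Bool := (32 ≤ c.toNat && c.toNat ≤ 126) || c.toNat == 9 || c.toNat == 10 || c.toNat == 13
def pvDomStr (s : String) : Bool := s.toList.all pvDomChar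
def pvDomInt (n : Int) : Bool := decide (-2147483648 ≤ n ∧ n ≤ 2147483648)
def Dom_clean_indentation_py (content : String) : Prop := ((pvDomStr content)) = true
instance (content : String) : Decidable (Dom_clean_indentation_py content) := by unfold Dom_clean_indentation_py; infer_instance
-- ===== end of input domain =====

-- B replaces A's single stateful flag loop by three stateless staged passes:
-- map lstrip over all lines, dedup adjacent blank entries via zip-with-predecessor,
-- then the same trailing pop + join (objective: alternative, same cost).


-- ===== PORT A =====
-- 'while cleaned_lines and cleaned_lines[-1] == "": cleaned_lines.pop()' — drops trailing ''
-- entries; the identical while loop appears verbatim in Source B, so both ports share this helper.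
def pvPopTrailing : List String → List String
  | [] => []
  | x :: xs =>
    match pvPopTrailing xs with
    | [] => if x = "" then [] else [x]
    | ys => x :: ys

-- the body of A's for-loop (cleaned_lines, prev_empty as the fold state)
def pvStepA (st : List String × Bool) (line : String) : List String × Bool :=
  if PySem.Str.strip line ≠ "" then (st.1 ++ [PySem.Str.lstrip line], false)
  else if st.2 = false then (st.1 ++ [""], true) else st

def clean_indentation_py (content : String) : String :=
  -- sep is the non-empty literal "\n", so Python's split never raises and split? is always some
  let lines := (PySem.Str.split? content "\n").getD []
  let st := lines.foldl pvStepA ([], false)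
  PySem.Str.join "\n" (pvPopTrailing st.1)

-- ===== PORT B =====
def clean_indentation_py_alt (content : String) : String :=
  -- sep is the non-empty literal "\n", so Python's split never raises and split? is always some
  let lines := (PySem.Str.split? content "\n").getD []
  -- stage 1: lstrip every line
  let stripped := lines.map PySem.Str.lstrip
  -- stage 2: stripped[:1] + [cur for prev, cur in zip(stripped, stripped[1:]) if cur or prev]
  let kept := stripped.take 1 ++
    ((stripped.zip stripped.tail).filter (fun p => p.2 != "" || p.1 != "")).map Prod.snd
  -- stage 3: pop trailing '' entries, then join
  PySem.Str.join "\n" (pvPopTrailing kept)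

-- ===== PRECONDITION & SPEC =====
def Spec_clean_indentation_py (content : String) (out : String) : Prop := out = clean_indentation_py_alt content
instance (content : String) (out : String) : Decidable (Spec_clean_indentation_py content out) := by unfold Spec_clean_indentation_py; infer_instance

-- ===== CLAIM (what is proved, stated in full; the proofs are below) =====
def Claim_equal_clean_indentation_py : Prop := ∀ (content : String), Dom_clean_indentation_py content → Spec_clean_indentation_py content (clean_indentation_py content)

-- ===== LEMMAS AND PROOFS =====

-- a line lstrips to "" exactly when it strips to "" (both mean: all characters whitespace)
theorem pv_strip_empty_iff (l : String) :
    (PySem.Str.strip l = "") ↔ (PySem.Str.lstrip l = "") := by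
  have hdw : ∀ cs : List Char,
      (∀ c ∈ cs.dropWhile PySem.Chars.isspace, PySem.Chars.isspace c = true)
        ↔ (∀ c ∈ cs, PySem.Chars.isspace c = true) := by
    intro cs
    constructor
    · intro h c hc
      rw [← List.takeWhile_append_dropWhile (p := PySem.Chars.isspace) (l := cs)] at hc
      rcases List.mem_append.mp hc with h1 | h2
      · exact List.mem_takeWhile_imp h1
      · exact h c h2
    · intro h c hc
      exact h c ((List.dropWhile_sublist _).subset hc)
  have h1 : PySem.Str.strip l = "" ↔ (PySem.Str.strip l).toList = [] := by
    constructor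
    · intro h; rw [h]; rfl
    · intro h; exact String.toList_inj.mp h
  have h2 : PySem.Str.lstrip l = "" ↔ (PySem.Str.lstrip l).toList = [] := by
    constructor
    · intro h; rw [h]; rfl
    · intro h; exact String.toList_inj.mp h
  rw [h1, h2, PySem.Str.toList_strip, PySem.Str.toList_lstrip]
  unfold PySem.Chars.strip PySem.Chars.rstrip PySem.Chars.lstrip
  rw [List.reverse_eq_nil_iff, List.dropWhile_eq_nil_iff, List.dropWhile_eq_nil_iff]
  constructor
  · intro h
    exact (hdw l.toList).mp (fun c hc => h c (List.mem_reverse.mpr hc))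
  · intro h c hc
    exact (hdw l.toList).mpr h c (List.mem_reverse.mp hc)

-- the common reference list: adjacent-'' deduplication with flag b = 'predecessor was blank'
def pvDedup : Bool → List String → List String
  | _, [] => []
  | b, x :: xs =>
    if x = "" then (if b then pvDedup true xs else "" :: pvDedup true xs)
    else x :: pvDedup false xs

-- A's flag-fold computes pvDedup of the lstripped lines
theorem foldl_stepA_eq_dedup : ∀ (ls acc : List String) (b : Bool),
    (ls.foldl pvStepA (acc, b)).1 = acc ++ pvDedup b (ls.map PySem.Str.lstrip) := by
  intro ls
  induction ls with
  | nil => intro acc b; simp [pvDedup]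
  | cons l ls ih =>
    intro acc b
    by_cases h : PySem.Str.strip l = ""
    · have hl : PySem.Str.lstrip l = "" := (pv_strip_empty_iff l).mp h
      cases b with
      | false =>
        have hstep : pvStepA (acc, false) l = (acc ++ [""], true) := by
          simp [pvStepA, h]
        simp [List.foldl_cons, hstep, ih, pvDedup, hl]
      | true =>
        have hstep : pvStepA (acc, true) l = (acc, true) := by
          simp [pvStepA, h]
        simp [List.foldl_cons, hstep, ih, pvDedup, hl]
    · have hl : ¬ PySem.Str.lstrip l = "" := fun e => h ((pv_strip_empty_iff l).mpr e)
      have hstep : pvStepA (acc, b) l = (acc ++ [PySem.Str.lstrip l], false) := by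
        simp [pvStepA, h]
      simp [List.foldl_cons, hstep, ih, pvDedup, hl]

-- B's zip-filter pass computes pvDedup with flag 'prev is blank'
theorem zip_filter_eq_dedup : ∀ (xs : List String) (prev : String),
    (((prev :: xs).zip xs).filter (fun p => p.2 != "" || p.1 != "")).map Prod.snd
      = pvDedup (decide (prev = "")) xs := by
  intro xs
  induction xs with
  | nil => intro prev; simp [pvDedup]
  | cons y ys ih =>
    intro prev
    by_cases hy : y = ""
    · by_cases hp : prev = ""
      · simp [pvDedup, hy, hp, ih]
      · simp [pvDedup, hy, hp, ih]
    · simp [pvDedup, hy, ih]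

theorem kept_eq_dedup (xs : List String) :
    xs.take 1 ++ ((xs.zip xs.tail).filter (fun p => p.2 != "" || p.1 != "")).map Prod.snd
      = pvDedup false xs := by
  cases xs with
  | nil => simp [pvDedup]
  | cons x xs =>
    simp only [List.take, List.tail_cons, List.singleton_append]
    rw [zip_filter_eq_dedup]
    by_cases hx : x = "" <;> simp [pvDedup, hx]

-- ===== VERDICT (by name: the statement is the Claim_ definition above) =====
theorem clean_indentation_py_spec : Claim_equal_clean_indentation_py := by
  intro content _
  unfold Spec_clean_indentation_py clean_indentation_py clean_indentation_py_alt
  simp only [foldl_stepA_eq_dedup, kept_eq_dedup, List.nil_append]
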